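-- pv_equiv track=rewrite | github.com/bakameai/mvp | bakame-backend/app/services/newsapi_service.py | _convert_headlines_to_debate_topics
-- ===== SOURCE A (Python) =====
-- from typing import List, Dict, Any
--
-- def _convert_headlines_to_debate_topics(headlines: List[str]) -> List[str]:
--     """Convert news headlines into debate-worthy questions"""
--     debate_topics = []
--
--     for headline in headlines:
--         if "AI" in headline or "artificial intelligence" in headline.lower():
--             debate_topics.append("Should artificial intelligence be regulated by governments?")
--         elif "climate" in headline.lower() or "environment" in headline.lower():
--             debate_topics.append("Is individual action or government policy more important for addressing climate change?")
--         elif "social media" in headline.lower() or "facebook" in headline.lower() or "twitter" in headline.lower():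
--             debate_topics.append("Do social media platforms have too much influence on public opinion?")
--         elif "education" in headline.lower() or "school" in headline.lower():
--             debate_topics.append("Should education be completely free, including university?")
--         elif "healthcare" in headline.lower() or "medical" in headline.lower():
--             debate_topics.append("Should healthcare be a universal right or a market service?")
--         elif "technology" in headline.lower() or "tech" in headline.lower():
--             debate_topics.append("Is technology making us more connected or more isolated?")
--         elif "work" in headline.lower() or "job" in headline.lower() or "employment" in headline.lower():
--             debate_topics.append("Should there be a universal basic income?")
--
--     return list(set(debate_topics))
-- ===== SOURCE B (Python) =====
-- # Two-stage rewrite: a rule-major marking pass records each headline's first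
-- # matching rule index in an array; a second pass collects the topics in
-- # headline order; same set dedup at the end.
-- _RULES = [
--     (lambda h, low: "AI" in h or "artificial intelligence" in low,
--      "Should artificial intelligence be regulated by governments?"),
--     (lambda h, low: "climate" in low or "environment" in low,
--      "Is individual action or government policy more important for addressing climate change?"),
--     (lambda h, low: "social media" in low or "facebook" in low or "twitter" in low,
--      "Do social media platforms have too much influence on public opinion?"),
--     (lambda h, low: "education" in low or "school" in low,
--      "Should education be completely free, including university?"),
--     (lambda h, low: "healthcare" in low or "medical" in low,
--      "Should healthcare be a universal right or a market service?"),
--     (lambda h, low: "technology" in low or "tech" in low,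
--      "Is technology making us more connected or more isolated?"),
--     (lambda h, low: "work" in low or "job" in low or "employment" in low,
--      "Should there be a universal basic income?"),
-- ]
--
-- def _convert_headlines_to_debate_topics(headlines):
--     lows = [h.lower() for h in headlines]
--     first = [None] * len(headlines)
--     for i, (pred, _topic) in enumerate(_RULES):
--         for j in range(len(headlines)):
--             if first[j] is None and pred(headlines[j], lows[j]):
--                 first[j] = i
--     topics = [_RULES[i][1] for i in first if i is not None]
--     return list(set(topics))
-- ===== Notes on version B (the rewrite author's own statement) =====
-- stated objective: alternative
-- what changed: Inverts the loop nest: a rule-major marking pass fills an array of first-matching-rule indices per headline (instead of A's headline-major if/elif chain), then a separate collection pass maps indices to topics before the set dedup.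
import Mathlib
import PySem

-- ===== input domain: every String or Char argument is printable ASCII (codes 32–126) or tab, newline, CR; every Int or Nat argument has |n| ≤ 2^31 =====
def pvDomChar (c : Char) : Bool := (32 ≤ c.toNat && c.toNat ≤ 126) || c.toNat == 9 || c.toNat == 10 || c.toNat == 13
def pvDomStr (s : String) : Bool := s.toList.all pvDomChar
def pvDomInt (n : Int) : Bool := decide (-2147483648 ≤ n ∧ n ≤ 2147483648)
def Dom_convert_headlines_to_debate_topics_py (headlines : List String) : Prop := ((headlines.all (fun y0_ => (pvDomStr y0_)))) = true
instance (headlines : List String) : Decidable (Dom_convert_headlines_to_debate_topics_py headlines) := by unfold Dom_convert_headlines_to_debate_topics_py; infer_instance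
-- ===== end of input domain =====

-- B inverts the loop nest: a rule-major marking pass records each headline's first matching rule index, then a collection pass maps indices to topics (objective: alternative decomposition, same cost).


-- ===== PORT A =====
-- if/elif chain over each headline, appending the matched topic; list(set(...)) at the end.
def pvStepA (acc : List String) (h : String) : List String :=
  let l := PySem.Str.lower h
  if PySem.Str.isIn "AI" h || PySem.Str.isIn "artificial intelligence" l then
    acc ++ ["Should artificial intelligence be regulated by governments?"]
  else if PySem.Str.isIn "climate" l || PySem.Str.isIn "environment" l then
    acc ++ ["Is individual action or government policy more important for addressing climate change?"]
  else if PySem.Str.isIn "social media" l || PySem.Str.isIn "facebook" l || PySem.Str.isIn "twitter" l then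
    acc ++ ["Do social media platforms have too much influence on public opinion?"]
  else if PySem.Str.isIn "education" l || PySem.Str.isIn "school" l then
    acc ++ ["Should education be completely free, including university?"]
  else if PySem.Str.isIn "healthcare" l || PySem.Str.isIn "medical" l then
    acc ++ ["Should healthcare be a universal right or a market service?"]
  else if PySem.Str.isIn "technology" l || PySem.Str.isIn "tech" l then
    acc ++ ["Is technology making us more connected or more isolated?"]
  else if PySem.Str.isIn "work" l || PySem.Str.isIn "job" l || PySem.Str.isIn "employment" l then
    acc ++ ["Should there be a universal basic income?"]
  else acc

def convert_headlines_to_debate_topics_py (headlines : List String) : List String :=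
  PySem.Set.ofList (headlines.foldl pvStepA [])

-- ===== PORT B =====
-- B's rule table: (predicate over (headline, lowered headline), topic).
def pvRulesB : List ((String → String → Bool) × String) :=
  [ (fun h low => PySem.Str.isIn "AI" h || PySem.Str.isIn "artificial intelligence" low,
     "Should artificial intelligence be regulated by governments?"),
    (fun _h low => PySem.Str.isIn "climate" low || PySem.Str.isIn "environment" low,
     "Is individual action or government policy more important for addressing climate change?"),
    (fun _h low => PySem.Str.isIn "social media" low || PySem.Str.isIn "facebook" low || PySem.Str.isIn "twitter" low,
     "Do social media platforms have too much influence on public opinion?"),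
    (fun _h low => PySem.Str.isIn "education" low || PySem.Str.isIn "school" low,
     "Should education be completely free, including university?"),
    (fun _h low => PySem.Str.isIn "healthcare" low || PySem.Str.isIn "medical" low,
     "Should healthcare be a universal right or a market service?"),
    (fun _h low => PySem.Str.isIn "technology" low || PySem.Str.isIn "tech" low,
     "Is technology making us more connected or more isolated?"),
    (fun _h low => PySem.Str.isIn "work" low || PySem.Str.isIn "job" low || PySem.Str.isIn "employment" low,
     "Should there be a universal basic income?") ]

-- 'first[j] = i on the first matching rule' marking pass, then the collection pass.
def convert_headlines_to_debate_topics_py_alt (headlines : List String) : List String :=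
  let lows := headlines.map PySem.Str.lower
  let pairs := headlines.zip lows
  let first := (PySem.List.enumerate pvRulesB).foldl
    (fun st ir => List.zipWith
      (fun o p => if o.isNone && ir.2.1 p.1 p.2 then some ir.1 else o) st pairs)
    (List.replicate headlines.length (none : Option Int))
  let topics := first.filterMap (fun o =>
    o.map (fun i => (PySem.List.pyGetD pvRulesB i ((fun _ _ => false), "")).2))
  PySem.Set.ofList topics

-- ===== PRECONDITION & SPEC =====
def Spec_convert_headlines_to_debate_topics_py (headlines : List String) (out : List String) : Prop := out = convert_headlines_to_debate_topics_py_alt headlines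
instance (headlines : List String) (out : List String) : Decidable (Spec_convert_headlines_to_debate_topics_py headlines out) := by unfold Spec_convert_headlines_to_debate_topics_py; infer_instance

-- ===== CLAIM =====
def Claim_equal_convert_headlines_to_debate_topics_py : Prop := ∀ (headlines : List String), Dom_convert_headlines_to_debate_topics_py headlines → Spec_convert_headlines_to_debate_topics_py headlines (convert_headlines_to_debate_topics_py headlines)

-- ===== LEMMAS AND PROOFS =====

-- the per-headline first-matching-rule index (proof-side characterisation of B's marking pass)
def pvEntry (h : String) : Option Int :=
  (PySem.List.enumerate pvRulesB).foldl
    (fun o ir => if o.isNone && ir.2.1 h (PySem.Str.lower h) then some ir.1 else o) none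

def pvTopic? (h : String) : Option String :=
  (pvEntry h).map (fun i => (PySem.List.pyGetD pvRulesB i ((fun _ _ => false), "")).2)

lemma foldl_mark_cons (rs : List (Int × ((String → String → Bool) × String)))
    (o : Option Int) (os : List (Option Int)) (p : String × String) (ps : List (String × String)) :
    rs.foldl (fun st ir => List.zipWith
        (fun (o' : Option Int) (q : String × String) =>
          if o'.isNone && ir.2.1 q.1 q.2 then some ir.1 else o') st (p :: ps)) (o :: os)
      = (rs.foldl (fun a ir => if a.isNone && ir.2.1 p.1 p.2 then some ir.1 else a) o)
        :: rs.foldl (fun st ir => List.zipWith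
            (fun (o' : Option Int) (q : String × String) =>
              if o'.isNone && ir.2.1 q.1 q.2 then some ir.1 else o') st ps) os := by
  induction rs generalizing o os with
  | nil => rfl
  | cons r rs ih => simp only [List.foldl, List.zipWith_cons_cons]; exact ih ..

lemma firstList (hs : List String) :
    (PySem.List.enumerate pvRulesB).foldl
      (fun st ir => List.zipWith
        (fun (o : Option Int) (p : String × String) =>
          if o.isNone && ir.2.1 p.1 p.2 then some ir.1 else o) st (hs.zip (hs.map PySem.Str.lower)))
      (List.replicate hs.length (none : Option Int)) = hs.map pvEntry := by
  induction hs with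
  | nil => rfl
  | cons h t ih =>
    simp only [List.map, List.zip_cons_cons, List.length_cons, List.replicate_succ]
    rw [foldl_mark_cons, ih]
    rfl

lemma foldl_first_some (rs : List (Int × ((String → String → Bool) × String))) (h : String) (i : Int) :
    rs.foldl (fun o ir => if o.isNone && ir.2.1 h (PySem.Str.lower h) then some ir.1 else o) (some i) = some i := by
  induction rs with
  | nil => rfl
  | cons r rs ih => simpa using ih

lemma entry_cons (rs : List (Int × ((String → String → Bool) × String)))
    (i : Int) (pr : (String → String → Bool) × String) (h : String) :
    ((i, pr) :: rs).foldl (fun o ir => if o.isNone && ir.2.1 h (PySem.Str.lower h) then some ir.1 else o) none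
      = if pr.1 h (PySem.Str.lower h) then some i
        else rs.foldl (fun o ir => if o.isNone && ir.2.1 h (PySem.Str.lower h) then some ir.1 else o) none := by
  rw [List.foldl_cons]
  simp only [Option.isNone_none, Bool.true_and]
  by_cases hc : pr.1 h (PySem.Str.lower h) = true
  · rw [if_pos hc, if_pos hc]; exact foldl_first_some rs h i
  · rw [if_neg hc, if_neg hc]

lemma pvEntry_eq (h : String) :
    pvEntry h =
      (if PySem.Str.isIn "AI" h || PySem.Str.isIn "artificial intelligence" (PySem.Str.lower h) then some (0 : Int)
       else if PySem.Str.isIn "climate" (PySem.Str.lower h) || PySem.Str.isIn "environment" (PySem.Str.lower h) then some 1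
       else if PySem.Str.isIn "social media" (PySem.Str.lower h) || PySem.Str.isIn "facebook" (PySem.Str.lower h) || PySem.Str.isIn "twitter" (PySem.Str.lower h) then some 2
       else if PySem.Str.isIn "education" (PySem.Str.lower h) || PySem.Str.isIn "school" (PySem.Str.lower h) then some 3
       else if PySem.Str.isIn "healthcare" (PySem.Str.lower h) || PySem.Str.isIn "medical" (PySem.Str.lower h) then some 4
       else if PySem.Str.isIn "technology" (PySem.Str.lower h) || PySem.Str.isIn "tech" (PySem.Str.lower h) then some 5
       else if PySem.Str.isIn "work" (PySem.Str.lower h) || PySem.Str.isIn "job" (PySem.Str.lower h) || PySem.Str.isIn "employment" (PySem.Str.lower h) then some 6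
       else none) := by
  simp only [pvEntry, pvRulesB, PySem.List.enumerate_cons, PySem.List.enumerate_nil, entry_cons,
    List.foldl_nil]
  norm_num

lemma pvStepA_eq (acc : List String) (h : String) :
    pvStepA acc h = acc ++ (pvTopic? h).toList := by
  have t0 : (PySem.List.pyGetD pvRulesB (0 : Int) ((fun _ _ => false), "")).2 = "Should artificial intelligence be regulated by governments?" := rfl
  have t1 : (PySem.List.pyGetD pvRulesB (1 : Int) ((fun _ _ => false), "")).2 = "Is individual action or government policy more important for addressing climate change?" := rfl
  have t2 : (PySem.List.pyGetD pvRulesB (2 : Int) ((fun _ _ => false), "")).2 = "Do social media platforms have too much influence on public opinion?" := rfl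
  have t3 : (PySem.List.pyGetD pvRulesB (3 : Int) ((fun _ _ => false), "")).2 = "Should education be completely free, including university?" := rfl
  have t4 : (PySem.List.pyGetD pvRulesB (4 : Int) ((fun _ _ => false), "")).2 = "Should healthcare be a universal right or a market service?" := rfl
  have t5 : (PySem.List.pyGetD pvRulesB (5 : Int) ((fun _ _ => false), "")).2 = "Is technology making us more connected or more isolated?" := rfl
  have t6 : (PySem.List.pyGetD pvRulesB (6 : Int) ((fun _ _ => false), "")).2 = "Should there be a universal basic income?" := rfl
  simp only [pvTopic?, pvEntry_eq, pvStepA]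
  split_ifs <;> simp_all

lemma foldlA_eq (headlines : List String) (acc : List String) :
    headlines.foldl pvStepA acc = acc ++ headlines.filterMap pvTopic? := by
  induction headlines generalizing acc with
  | nil => simp
  | cons h t ih =>
    simp only [List.foldl, pvStepA_eq, ih, List.filterMap_cons]
    cases pvTopic? h <;> simp

lemma alt_eq (headlines : List String) :
    convert_headlines_to_debate_topics_py_alt headlines
      = PySem.Set.ofList (headlines.filterMap pvTopic?) := by
  dsimp only [convert_headlines_to_debate_topics_py_alt]
  rw [firstList, List.filterMap_map]
  rfl

-- ===== VERDICT =====
theorem convert_headlines_to_debate_topics_py_spec : Claim_equal_convert_headlines_to_debate_topics_py := by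
  intro headlines _
  unfold Spec_convert_headlines_to_debate_topics_py
  rw [alt_eq]
  unfold convert_headlines_to_debate_topics_py
  rw [foldlA_eq]
  simp
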